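-- pv_equiv track=rewrite | github.com/ysig/learnable-typewriter | learnable_typewriter/evaluate/quantitative/metrics.py | convert
-- ===== SOURCE A (Python) =====
-- def convert(input):
--     multi = 1
--     base = 0
--     for elt in input[::-1]:
--         if not elt == 10:
--             base += elt * multi
--             multi *= 10
--     return(base)
-- ===== SOURCE B (Python) =====
-- def convert(input):
--     result = 0
--     for elt in input:
--         if elt != 10:
--             result = result * 10 + elt
--     return result
-- ===== Notes on version B (the rewrite author's own statement) =====
-- stated objective: idiomatic
-- what changed: Replaces the reversed-iteration place-value accumulation (base/multi pair updated back-to-front) with a single forward Horner pass result = result*10 + elt.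
import Mathlib
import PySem

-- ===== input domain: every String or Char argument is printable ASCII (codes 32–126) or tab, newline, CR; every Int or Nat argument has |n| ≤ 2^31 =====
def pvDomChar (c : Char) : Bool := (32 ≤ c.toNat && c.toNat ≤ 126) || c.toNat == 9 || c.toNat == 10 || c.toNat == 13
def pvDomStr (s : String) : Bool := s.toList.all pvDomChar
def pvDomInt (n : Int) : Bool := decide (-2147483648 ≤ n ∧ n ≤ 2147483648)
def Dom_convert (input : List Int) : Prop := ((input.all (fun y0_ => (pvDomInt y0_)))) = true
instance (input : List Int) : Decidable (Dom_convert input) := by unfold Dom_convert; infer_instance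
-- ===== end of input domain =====

-- B replaces A's reversed iteration with a (multi, base) pair by a forward Horner pass
-- with a single accumulator (idiomatic; return value unchanged).

-- ===== PORT A =====
-- input[::-1] is list reversal; the loop carries the pair (multi, base).
def convert (input : List Int) : Int :=
  (input.reverse.foldl
    (fun (st : Int × Int) elt =>
      if ¬ (elt = 10) then (st.1 * 10, st.2 + elt * st.1) else st)
    (1, 0)).2

-- ===== PORT B =====
def convert_alt (input : List Int) : Int :=
  input.foldl (fun result elt => if elt ≠ 10 then result * 10 + elt else result) 0

-- ===== PRECONDITION & SPEC =====
def Spec_convert (input : List Int) (out : Int) : Prop := out = convert_alt input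
instance (input : List Int) (out : Int) : Decidable (Spec_convert input out) := by unfold Spec_convert; infer_instance

-- ===== CLAIM (what is proved, stated in full; the proofs are below) =====
def Claim_equal_convert : Prop := ∀ (input : List Int), Dom_convert input → Spec_convert input (convert input)

-- ===== LEMMAS AND PROOFS =====

-- the loop bodies in if-flipped normal form (what simp's ite_not produces)
-- forward Horner with an arbitrary starting accumulator
lemma convert_alt_acc (l : List Int) (r : Int) :
    l.foldl (fun result elt => if elt = 10 then result else result * 10 + elt) r
      = r * 10 ^ ((l.filter (fun e => !decide (e = 10))).length)
        + l.foldl (fun result elt => if elt = 10 then result else result * 10 + elt) 0 := by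
  induction l generalizing r with
  | nil => simp
  | cons e t ih =>
    by_cases he : e = 10
    · simp only [List.foldl_cons, List.filter_cons]
      simp [he]
      exact ih r
    · simp only [List.foldl_cons, List.filter_cons]
      simp [he]
      rw [ih (r * 10 + e), ih e]
      rw [pow_succ]
      ring

-- A's reversed loop computes (m·10^c, b + m·horner)
lemma convertA_pair (l : List Int) (m b : Int) :
    (l.reverse.foldl
      (fun (st : Int × Int) elt =>
        if elt = 10 then st else (st.1 * 10, st.2 + elt * st.1))
      (m, b))
      = (m * 10 ^ ((l.filter (fun e => !decide (e = 10))).length),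
         b + m * l.foldl (fun result elt => if elt = 10 then result else result * 10 + elt) 0) := by
  induction l generalizing m b with
  | nil => simp
  | cons e t ih =>
    rw [List.reverse_cons, List.foldl_append, ih]
    by_cases he : e = 10
    · simp [he]
    · simp [he]
      rw [convert_alt_acc t e, pow_succ]
      constructor <;> ring

-- ===== VERDICT (by name: the statement is the Claim_ definition above) =====
theorem convert_spec : Claim_equal_convert := by
  intro input _
  unfold Spec_convert convert convert_alt
  simp only [ne_eq, ite_not]
  rw [convertA_pair]
  simp
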